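-- pv_equiv track=rewrite | github.com/milanzderadicka-glitch/strava-webhook | app.py | find_last_filled_strava_id_row
-- ===== SOURCE A (Python) =====
-- def find_last_filled_strava_id_row(values, start_row=2):
--     for i in range(len(values) - 1, -1, -1):
--         cell = values[i][0] if values[i] else ""
--
--         if cell not in ("", None):
--             excel_row = start_row + i
--             strava_id = cell
--             return excel_row, strava_id
--
--     return None, None
-- ===== SOURCE B (Python) =====
-- def find_last_filled_strava_id_row(values, start_row=2):
--     best = (None, None)
--     for i, row in enumerate(values):
--         cell = row[0] if row else ""
--         if cell not in ("", None):
--             best = (start_row + i, cell)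
--     return best
-- ===== Notes on version B (the rewrite author's own statement) =====
-- stated objective: alternative
-- what changed: Replaces the backward index loop with early return by a forward enumerate pass keeping the last non-empty first cell in an accumulator.
import Mathlib
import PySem

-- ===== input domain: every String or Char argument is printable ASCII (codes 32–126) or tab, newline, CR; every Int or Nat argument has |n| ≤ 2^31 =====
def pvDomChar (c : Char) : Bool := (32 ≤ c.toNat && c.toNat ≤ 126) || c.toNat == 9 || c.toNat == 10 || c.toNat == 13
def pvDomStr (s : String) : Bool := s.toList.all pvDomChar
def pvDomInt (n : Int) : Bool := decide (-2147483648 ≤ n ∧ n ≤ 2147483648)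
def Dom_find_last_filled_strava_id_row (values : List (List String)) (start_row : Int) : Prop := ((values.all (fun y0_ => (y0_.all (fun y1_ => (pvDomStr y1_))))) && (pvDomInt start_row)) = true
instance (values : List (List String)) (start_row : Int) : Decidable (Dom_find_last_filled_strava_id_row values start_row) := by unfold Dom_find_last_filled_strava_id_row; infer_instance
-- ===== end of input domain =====

-- B replaces A's backward index loop with early return by a forward pass keeping the last filled cell in an accumulator (alternative decomposition, same cost).


-- ===== PORT A =====
-- cell = values[i][0] if values[i] else "" (the [0] access is always in range when the row is non-empty)
def pvFirstCell (row : List String) : String :=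
  match row with
  | [] => ""
  | c :: _ => c

-- for i in range(len(values)-1, -1, -1): the loop counts k = i+1 down from len(values);
-- values[i] is in range at every call made (k ≤ len(values)), rendered by getD.
-- `cell not in ("", None)` for a string cell is exactly `cell ≠ ""`.
def pvGoA (values : List (List String)) (start_row : Int) : Nat → Option Int × Option String
  | 0 => (none, none)
  | Nat.succ i =>
    let cell := pvFirstCell (values.getD i [])
    if cell ≠ "" then (some (start_row + (i : Int)), some cell)
    else pvGoA values start_row i

def find_last_filled_strava_id_row (values : List (List String)) (start_row : Int) : Option Int × Option String :=
  pvGoA values start_row values.length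

-- ===== PORT B =====
-- forward enumerate loop, overwriting accumulator `best`
def pvGoB (start_row : Int) : Nat → (Option Int × Option String) → List (List String) → Option Int × Option String
  | _, best, [] => best
  | i, best, row :: rest =>
    let cell := pvFirstCell row
    pvGoB start_row (i + 1) (if cell ≠ "" then (some (start_row + (i : Int)), some cell) else best) rest

def find_last_filled_strava_id_row_alt (values : List (List String)) (start_row : Int) : Option Int × Option String :=
  pvGoB start_row 0 (none, none) values

-- ===== PRECONDITION & SPEC =====
def Spec_find_last_filled_strava_id_row (values : List (List String)) (start_row : Int) (out : Option Int × Option String) : Prop := out = find_last_filled_strava_id_row_alt values start_row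
instance (values : List (List String)) (start_row : Int) (out : Option Int × Option String) : Decidable (Spec_find_last_filled_strava_id_row values start_row out) := by unfold Spec_find_last_filled_strava_id_row; infer_instance

-- ===== CLAIM (what is proved, stated in full; the proofs are below) =====
def Claim_equal_find_last_filled_strava_id_row : Prop := ∀ (values : List (List String)) (start_row : Int), Dom_find_last_filled_strava_id_row values start_row → Spec_find_last_filled_strava_id_row values start_row (find_last_filled_strava_id_row values start_row)

-- ===== LEMMAS AND PROOFS =====

-- A's scan on xs ++ [x] restricted to the first k ≤ |xs| indices only looks into xs.
theorem pvGoA_append (xs : List (List String)) (x : List String) (sr : Int) :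
    ∀ k, k ≤ xs.length → pvGoA (xs ++ [x]) sr k = pvGoA xs sr k := by
  intro k
  induction k with
  | zero => intro _; rfl
  | succ k ih =>
    intro hk
    have hklt : k < xs.length := hk
    simp only [pvGoA, List.getD, List.getElem?_append_left hklt, ih (Nat.le_of_lt hklt)]

-- B's scan on xs ++ [x]: the last row decides iff its first cell is non-empty.
theorem pvGoB_append (x : List String) (sr : Int) :
    ∀ (xs : List (List String)) (i : Nat) (best : Option Int × Option String),
      pvGoB sr i best (xs ++ [x]) =
        (if pvFirstCell x ≠ "" then (some (sr + ((i + xs.length : Nat) : Int)), some (pvFirstCell x))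
         else pvGoB sr i best xs) := by
  intro xs
  induction xs with
  | nil => intro i best; simp [pvGoB]
  | cons row rest ih =>
    intro i best
    simp only [List.cons_append, pvGoB, ih, List.length_cons]
    have h : i + 1 + rest.length = i + (rest.length + 1) := by omega
    rw [h]

theorem pvMain (sr : Int) (values : List (List String)) :
    pvGoA values sr values.length = pvGoB sr 0 (none, none) values := by
  induction values using List.reverseRecOn with
  | nil => rfl
  | append_singleton xs x ih =>
    rw [pvGoB_append]
    have hlen : (xs ++ [x]).length = xs.length + 1 := by simp
    rw [hlen]
    by_cases hc : pvFirstCell x ≠ ""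
    · simp only [pvGoA, List.getD, List.getElem?_append_right (le_refl xs.length),
        Nat.sub_self, List.getElem?_cons_zero, Option.getD_some, if_pos hc]
      simp
    · simp only [pvGoA, List.getD, List.getElem?_append_right (le_refl xs.length),
        Nat.sub_self, List.getElem?_cons_zero, Option.getD_some]
      simp only [hc, if_false]
      rw [pvGoA_append xs x sr xs.length (le_refl _)]
      exact ih

-- ===== VERDICT (by name: the statement is the Claim_ definition above) =====
theorem find_last_filled_strava_id_row_spec : Claim_equal_find_last_filled_strava_id_row := by
  intro values start_row _
  show find_last_filled_strava_id_row values start_row = find_last_filled_strava_id_row_alt values start_row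
  exact pvMain start_row values
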